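-- pv_equiv track=rewrite | github.com/MohammedFahad60/URL-Validation | src/dfa_validator.py | validate_url
-- ===== SOURCE A (Python) =====
-- def validate_url(url):
--     state = 0
--     i = 0
--
--     while i < len(url):
--         char = url[i]
--
--         if state == 0:  # Start state
--             if url.startswith("http://"):
--                 state = 1
--                 i += 7
--             elif url.startswith("https://"):
--                 state = 1
--                 i += 8
--             else:
--                 return False
--
--         elif state == 1:  # Domain state
--             if char.isalnum() or char in ['-', '.']:
--                 state = 1
--                 i += 1
--             elif char == '/':
--                 state = 2
--                 i += 1
--             else:
--                 return False
--
--         elif state == 2:  # Path state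
--             if char.isalnum() or char in ['-', '_', '.', '/', '?', '=', '&']:
--                 state = 2
--                 i += 1
--             else:
--                 return False
--
--         else:
--             return False
--
--     return state in [1, 2]  # Accept states
-- ===== SOURCE B (Python) =====
-- def validate_url(url):
--     if url.startswith("http://"):
--         rest = url[7:]
--     elif url.startswith("https://"):
--         rest = url[8:]
--     else:
--         return False
--     domain, _, path = rest.partition('/')
--     return (all(c.isalnum() or c in '-.' for c in domain)
--             and all(c.isalnum() or c in '-_./?=&' for c in path))
-- ===== Notes on version B (the rewrite author's own statement) =====
-- stated objective: simpler
-- what changed: Replaces the explicit DFA state-machine loop with a prefix check plus a partition of the rest at the first slash, validating domain and path segments with two all() scans.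
import Mathlib
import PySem

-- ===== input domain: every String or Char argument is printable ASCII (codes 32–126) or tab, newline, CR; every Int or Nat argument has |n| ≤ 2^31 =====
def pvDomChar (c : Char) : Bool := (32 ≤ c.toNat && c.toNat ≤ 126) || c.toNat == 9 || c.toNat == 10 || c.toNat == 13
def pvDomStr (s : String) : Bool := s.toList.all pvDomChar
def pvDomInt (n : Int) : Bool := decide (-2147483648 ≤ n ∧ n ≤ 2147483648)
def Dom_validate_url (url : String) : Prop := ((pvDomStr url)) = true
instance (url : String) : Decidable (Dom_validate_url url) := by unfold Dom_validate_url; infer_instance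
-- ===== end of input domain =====

-- B replaces A's DFA loop with a prefix check + partition at the first slash and two all() scans, for simplicity; same return value.


-- ===== PORT A =====
-- literal port of A's while-loop DFA: state/index recursion over the char list
-- A's state-1 test: char.isalnum() or char in ['-', '.']
def aDomOk (char : Char) : Bool := PySem.Chars.isalnum char || char == '-' || char == '.'
-- A's state-2 test: char.isalnum() or char in ['-', '_', '.', '/', '?', '=', '&']
def aPathOk (char : Char) : Bool :=
  PySem.Chars.isalnum char || char == '-' || char == '_' || char == '.' ||
    char == '/' || char == '?' || char == '=' || char == '&'

def aLoop (cs : List Char) (state : Int) (i : Nat) : Bool :=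
  if h : i < cs.length then
    let char := cs[i]!
    if state == 0 then
      if PySem.Chars.startswith cs "http://".toList then aLoop cs 1 (i + 7)
      else if PySem.Chars.startswith cs "https://".toList then aLoop cs 1 (i + 8)
      else false
    else if state == 1 then
      if aDomOk char then aLoop cs 1 (i + 1)
      else if char == '/' then aLoop cs 2 (i + 1)
      else false
    else if state == 2 then
      if aPathOk char then aLoop cs 2 (i + 1)
      else false
    else false
  else state == 1 || state == 2
termination_by cs.length - i
decreasing_by all_goals omega

def validate_url (url : String) : Bool :=
  aLoop url.toList 0 0

-- ===== PORT B =====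
-- B: strip the scheme prefix, partition the rest at the first slash, validate both parts
def bDomOk (c : Char) : Bool := PySem.Chars.isalnum c || c == '-' || c == '.'

def bPathOk (c : Char) : Bool :=
  PySem.Chars.isalnum c || c == '-' || c == '_' || c == '.' ||
    c == '/' || c == '?' || c == '=' || c == '&'

-- rest.partition('/') = (chars before the first '/', sep, chars after it)
def bCheck (rest : List Char) : Bool :=
  (rest.takeWhile (· != '/')).all bDomOk &&
    ((rest.dropWhile (· != '/')).tail).all bPathOk

def validate_url_alt (url : String) : Bool :=
  if PySem.Chars.startswith url.toList "http://".toList then bCheck (url.toList.drop 7)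
  else if PySem.Chars.startswith url.toList "https://".toList then bCheck (url.toList.drop 8)
  else false

-- ===== PRECONDITION & SPEC =====
def Spec_validate_url (url : String) (out : Bool) : Prop := out = validate_url_alt url
instance (url : String) (out : Bool) : Decidable (Spec_validate_url url out) := by unfold Spec_validate_url; infer_instance

-- ===== CLAIM (what is proved, stated in full; the proofs are below) =====
def Claim_equal_validate_url : Prop := ∀ (url : String), Dom_validate_url url → Spec_validate_url url (validate_url url)

-- ===== LEMMAS AND PROOFS =====

lemma aDomOk_eq_bDomOk : aDomOk = bDomOk := rfl
lemma aPathOk_eq_bPathOk : aPathOk = bPathOk := rfl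

lemma bDomOk_ne_slash {c : Char} (h : bDomOk c = true) : (c != '/') = true := by
  by_cases hc : c = '/'
  · subst hc; exact absurd h (by decide)
  · simp [hc]

lemma bCheck_cons_dom {c : Char} {rest : List Char} (h : bDomOk c = true) :
    bCheck (c :: rest) = bCheck rest := by
  simp [bCheck, bDomOk_ne_slash h, h]

lemma bCheck_cons_slash (rest : List Char) : bCheck ('/' :: rest) = rest.all bPathOk := by
  simp [bCheck]

lemma bCheck_cons_bad {c : Char} {rest : List Char} (h1 : bDomOk c = false)
    (h2 : ¬ c = '/') : bCheck (c :: rest) = false := by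
  simp [bCheck, h2, h1]

lemma aLoop_state2 : ∀ (n : Nat) (cs : List Char) (i : Nat), cs.length - i = n →
    aLoop cs 2 i = (cs.drop i).all bPathOk := by
  intro n
  induction n with
  | zero =>
    intro cs i hn
    rw [aLoop]
    rw [dif_neg (by omega)]
    rw [List.drop_eq_nil_of_le (by omega)]
    simp
  | succ m ih =>
    intro cs i hn
    have hi : i < cs.length := by omega
    have hd : cs.drop i = cs[i] :: cs.drop (i + 1) := List.drop_eq_getElem_cons hi
    rw [aLoop]
    rw [dif_pos hi, hd]
    simp only [getElem!_pos cs i hi, List.all_cons, aPathOk_eq_bPathOk]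
    have ih1 := ih cs (i + 1) (by omega)
    by_cases hp : bPathOk cs[i] = true
    · simp [hp, ih1]
    · simp only [Bool.not_eq_true] at hp
      simp [hp]

lemma aLoop_state1 : ∀ (n : Nat) (cs : List Char) (i : Nat), cs.length - i = n →
    aLoop cs 1 i = bCheck (cs.drop i) := by
  intro n
  induction n with
  | zero =>
    intro cs i hn
    rw [aLoop]
    rw [dif_neg (by omega)]
    rw [List.drop_eq_nil_of_le (by omega)]
    simp [bCheck]
  | succ m ih =>
    intro cs i hn
    have hi : i < cs.length := by omega
    have hd : cs.drop i = cs[i] :: cs.drop (i + 1) := List.drop_eq_getElem_cons hi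
    rw [aLoop]
    rw [dif_pos hi, hd]
    simp only [getElem!_pos cs i hi, aDomOk_eq_bDomOk]
    have ih1 := ih cs (i + 1) (by omega)
    by_cases hc : bDomOk cs[i] = true
    · rw [bCheck_cons_dom hc, ← ih1]
      simp [hc]
    · simp only [Bool.not_eq_true] at hc
      by_cases hs : cs[i] = '/'
      · rw [hs, bCheck_cons_slash, ← aLoop_state2 (cs.length - (i + 1)) cs (i + 1) rfl]
        rw [hs] at hc
        simp [hc]
      · rw [bCheck_cons_bad hc hs]
        simp [hc, hs]

lemma startswith_length {cs p : List Char} (h : PySem.Chars.startswith cs p = true) :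
    p.length ≤ cs.length := by
  have := (PySem.Chars.startswith_iff cs p).mp h
  exact this.length_le

-- ===== VERDICT (by name: the statement is the Claim_ definition above) =====
theorem validate_url_spec : Claim_equal_validate_url := by
  intro url _
  unfold Spec_validate_url validate_url validate_url_alt
  have e7 : "http://".toList = ['h', 't', 't', 'p', ':', '/', '/'] := rfl
  have e8 : "https://".toList = ['h', 't', 't', 'p', 's', ':', '/', '/'] := rfl
  rw [e7, e8]
  by_cases h1 : PySem.Chars.startswith url.toList ['h', 't', 't', 'p', ':', '/', '/'] = true
  · have hlen : 7 ≤ url.toList.length := by simpa using startswith_length h1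
    rw [aLoop]
    rw [dif_pos (show 0 < url.toList.length by omega)]
    rw [e7, e8]
    simp [h1, aLoop_state1 (url.toList.length - 7) url.toList 7 rfl]
  · by_cases h2 : PySem.Chars.startswith url.toList ['h', 't', 't', 'p', 's', ':', '/', '/'] = true
    · have hlen : 8 ≤ url.toList.length := by simpa using startswith_length h2
      rw [aLoop]
      rw [dif_pos (show 0 < url.toList.length by omega)]
      rw [e7, e8]
      simp [h1, h2, aLoop_state1 (url.toList.length - 8) url.toList 8 rfl]
    · by_cases h0 : 0 < url.toList.length
      · rw [aLoop]
        rw [dif_pos h0]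
        rw [e7, e8]
        simp [h1, h2]
      · rw [aLoop]
        rw [dif_neg h0]
        simp [h1, h2]
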